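-- pv_equiv track=rewrite | github.com/aravindvrm/bnfo | avrm_rosalind_solutions/rosalind_counting_nucleotides.py | nucleotide_counter
-- ===== SOURCE A (Python) =====
-- def nucleotide_counter(input_file):
--     for line in input_file:
--         line = line.strip()
--         total_counts = [0]*4
--
--         for nt in line:
--             if nt == 'A':
--                 total_counts[0] += 1
--             elif nt == 'C':
--                 total_counts[1] += 1
--             elif nt == 'G':
--                 total_counts[2] += 1
--             else:
--                 total_counts[3] += 1
--
--     return ' '.join(str(c) for c in total_counts)
-- ===== SOURCE B (Python) =====
-- def nucleotide_counter(input_file):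
--     for line in input_file:
--         line = line.strip()
--         a = line.count('A')
--         c = line.count('C')
--         g = line.count('G')
--         total_counts = [a, c, g, len(line) - a - c - g]
--     return ' '.join(str(n) for n in total_counts)
-- ===== Notes on version B (the rewrite author's own statement) =====
-- stated objective: idiomatic
-- what changed: replaces the per-character if/elif branching loop with three library count scans per line and derives the catch-all T count by subtraction (len - a - c - g)
import Mathlib
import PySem

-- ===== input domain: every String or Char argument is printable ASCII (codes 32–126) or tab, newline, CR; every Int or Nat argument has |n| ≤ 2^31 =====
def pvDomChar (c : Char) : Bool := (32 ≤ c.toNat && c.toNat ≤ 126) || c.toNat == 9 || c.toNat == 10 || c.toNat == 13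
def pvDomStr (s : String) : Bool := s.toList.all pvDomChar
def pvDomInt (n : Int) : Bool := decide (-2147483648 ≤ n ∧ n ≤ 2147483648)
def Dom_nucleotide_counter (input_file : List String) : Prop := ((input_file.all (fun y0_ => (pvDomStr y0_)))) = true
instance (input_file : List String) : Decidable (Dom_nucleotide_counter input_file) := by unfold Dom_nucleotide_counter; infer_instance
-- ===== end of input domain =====

-- B replaces the per-character if/elif branching with three library count scans per line,
-- deriving the catch-all T count by subtraction (len - A - C - G); idiomatic, same cost.


-- ===== PORT A =====
-- the inner 'for nt in line' with the if/elif/else chain, state = the 4 counters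
def pvStepA (t : Int × Int × Int × Int) (nt : Char) : Int × Int × Int × Int :=
  if nt = 'A' then (t.1 + 1, t.2.1, t.2.2.1, t.2.2.2)
  else if nt = 'C' then (t.1, t.2.1 + 1, t.2.2.1, t.2.2.2)
  else if nt = 'G' then (t.1, t.2.1, t.2.2.1 + 1, t.2.2.2)
  else (t.1, t.2.1, t.2.2.1, t.2.2.2 + 1)

def nucleotide_counter (input_file : List String) : String :=
  -- each loop iteration resets total_counts to [0]*4 and counts its line; the last line's counts survive
  let t := input_file.foldl
    (fun _ line => (PySem.Str.strip line).toList.foldl pvStepA (0, 0, 0, 0)) (0, 0, 0, 0)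
  PySem.Str.join " " [PySem.Int.toStr t.1, PySem.Int.toStr t.2.1,
                      PySem.Int.toStr t.2.2.1, PySem.Int.toStr t.2.2.2]

-- ===== PORT B =====
def nucleotide_counter_alt (input_file : List String) : String :=
  let t := input_file.foldl
    (fun _ line =>
      let s := PySem.Str.strip line
      let a : Int := PySem.Str.count s "A"
      let c : Int := PySem.Str.count s "C"
      let g : Int := PySem.Str.count s "G"
      (a, c, g, (PySem.Str.len s : Int) - a - c - g)) (0, 0, 0, 0)
  PySem.Str.join " " [PySem.Int.toStr t.1, PySem.Int.toStr t.2.1,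
                      PySem.Int.toStr t.2.2.1, PySem.Int.toStr t.2.2.2]

-- ===== PRECONDITION & SPEC =====
-- Pre_ excludes only the empty file, on which A raises UnboundLocalError (total_counts never assigned).
def Pre_nucleotide_counter (input_file : List String) : Prop := input_file ≠ []
instance (input_file : List String) : Decidable (Pre_nucleotide_counter input_file) := by
  unfold Pre_nucleotide_counter; infer_instance
def pvWitness_nucleotide_counter : List String := ["ACGT"]

def Spec_nucleotide_counter (input_file : List String) (out : String) : Prop := out = nucleotide_counter_alt input_file
instance (input_file : List String) (out : String) : Decidable (Spec_nucleotide_counter input_file out) := by unfold Spec_nucleotide_counter; infer_instance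

-- ===== CLAIM (what is proved, stated in full; the proofs are below) =====
def Claim_equal_nucleotide_counter : Prop := ∀ (input_file : List String), Dom_nucleotide_counter input_file → Pre_nucleotide_counter input_file → Spec_nucleotide_counter input_file (nucleotide_counter input_file)

-- ===== LEMMAS AND PROOFS =====

-- count.go with a single-character needle counts occurrences of that character
theorem pv_count_go_single (c : Char) (fuel : Nat) (l : List Char) (acc : Nat)
    (h : l.length ≤ fuel) :
    PySem.Chars.count.go [c] fuel l acc = acc + l.count c := by
  induction fuel generalizing l acc with
  | zero =>
    cases l with
    | nil => simp [PySem.Chars.count.go]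
    | cons x t => simp at h
  | succ n ih =>
    cases l with
    | nil => simp [PySem.Chars.count.go]
    | cons x t =>
      simp only [List.length_cons, Nat.succ_le_succ_iff] at h
      by_cases hx : x = c
      · subst hx
        have hpre : List.isPrefixOf [x] (x :: t) = true := by
          simp [List.isPrefixOf]
        simp only [PySem.Chars.count.go, hpre, if_true, List.length, List.drop]
        rw [ih t (acc + 1) h]
        simp [List.count_cons]
        omega
      · have hpre : List.isPrefixOf [c] (x :: t) = false := by
          simp [List.isPrefixOf]
          exact fun hh => (hx hh.symm).elim
        simp only [PySem.Chars.count.go, hpre, Bool.false_eq_true, if_false]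
        rw [ih t acc h]
        have hcx : (c == x) = false := by
          simp only [beq_eq_false_iff_ne, ne_eq]
          exact fun hh => hx hh.symm
        have hxc : (x == c) = false := by simp [hx]
        simp [List.count_cons, hcx, hxc]

theorem pv_count_single (cs : List Char) (c : Char) :
    PySem.Chars.count cs [c] = cs.count c := by
  unfold PySem.Chars.count
  simp [pv_count_go_single c cs.length cs 0 le_rfl]

-- the if/elif/else character loop computes the three counts plus the complement
theorem pv_foldl_stepA (cs : List Char) (a c g t : Int) :
    cs.foldl pvStepA (a, c, g, t) =
      (a + cs.count 'A', c + cs.count 'C', g + cs.count 'G',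
       t + ((cs.length : Int) - cs.count 'A' - cs.count 'C' - cs.count 'G')) := by
  induction cs generalizing a c g t with
  | nil => simp
  | cons x xs ih =>
    simp only [List.foldl_cons]
    by_cases hA : x = 'A'
    · subst hA
      have hstep : pvStepA (a, c, g, t) 'A' = (a + 1, c, g, t) := by simp [pvStepA]
      rw [hstep, ih]
      simp only [List.count_cons, List.length_cons, Prod.mk.injEq]
      and_intros <;> (simp <;> push_cast <;> ring)
    · by_cases hC : x = 'C'
      · subst hC
        have hstep : pvStepA (a, c, g, t) 'C' = (a, c + 1, g, t) := by simp [pvStepA]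
        rw [hstep, ih]
        simp only [List.count_cons, List.length_cons, Prod.mk.injEq]
        and_intros <;> (simp <;> push_cast <;> ring)
      · by_cases hG : x = 'G'
        · subst hG
          have hstep : pvStepA (a, c, g, t) 'G' = (a, c, g + 1, t) := by simp [pvStepA]
          rw [hstep, ih]
          simp only [List.count_cons, List.length_cons, Prod.mk.injEq]
          and_intros <;> (simp <;> push_cast <;> ring)
        · have hstep : pvStepA (a, c, g, t) x = (a, c, g, t + 1) := by
            simp [pvStepA, hA, hC, hG]
          rw [hstep, ih]
          have h1 : (x == 'A') = false := by simp [hA]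
          have h2 : (x == 'C') = false := by simp [hC]
          have h3 : (x == 'G') = false := by simp [hG]
          simp only [List.count_cons, List.length_cons, h1, h2, h3, Bool.false_eq_true,
            if_false, add_zero, Prod.mk.injEq]
          and_intros <;> push_cast <;> ring

-- the line loop of A and the line loop of B compute the same counters
theorem pv_fold_eq (l : List String) (acc : Int × Int × Int × Int) :
    l.foldl (fun _ line => (PySem.Str.strip line).toList.foldl pvStepA (0, 0, 0, 0)) acc =
    l.foldl (fun _ line =>
      let s := PySem.Str.strip line
      let a : Int := PySem.Str.count s "A"
      let c : Int := PySem.Str.count s "C"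
      let g : Int := PySem.Str.count s "G"
      (a, c, g, (PySem.Str.len s : Int) - a - c - g)) acc := by
  induction l generalizing acc with
  | nil => rfl
  | cons x xs ih =>
    have hx : (PySem.Str.strip x).toList.foldl pvStepA (0, 0, 0, 0) =
        (let s := PySem.Str.strip x
         let a : Int := PySem.Str.count s "A"
         let c : Int := PySem.Str.count s "C"
         let g : Int := PySem.Str.count s "G"
         (a, c, g, (PySem.Str.len s : Int) - a - c - g)) := by
      simp only [PySem.Str.count_eq, PySem.Str.len_eq, PySem.Chars.len_eq,
        show "A".toList = ['A'] from rfl, show "C".toList = ['C'] from rfl,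
        show "G".toList = ['G'] from rfl, pv_count_single, pv_foldl_stepA]
      simp
    simp only [List.foldl_cons, hx, ih]

-- ===== VERDICT (by name: the statement is the Claim_ definition above) =====
theorem nucleotide_counter_spec : Claim_equal_nucleotide_counter := by
  intro input_file _ _
  unfold Spec_nucleotide_counter nucleotide_counter nucleotide_counter_alt
  rw [pv_fold_eq]
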